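-- pv_equiv track=rewrite | github.com/cogent3/cogent3 | cogent/align/pycompare.py | py_segments_from_diagonal
-- ===== SOURCE A (Python) =====
-- def py_segments_from_diagonal(seq1, seq2, window, threshold, min_gap_length,
--         diagonal):
--     d_segments = []
--     was_high = False
--     scores = [0] * window
--     score = 0
--     (i_lo, i_hi) = max(0, -diagonal), min(len(seq1), len(seq2)-diagonal)
--     for i in range(i_lo, i_hi):
--         j = i + diagonal
--         k = i % window
--         score -= scores[k]
--         scores[k] = seq1[i] == seq2[j]
--         score += scores[k]
--         if score >= threshold:
--             if not was_high:
--                 start = max(i_lo, i - window)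
--                 if d_segments and start-d_segments[-1][1] < min_gap_length:
--                     (start, jumped_end) = d_segments.pop()
--                 was_high = True
--         else:
--             if was_high:
--                 d_segments.append((start, i))
--                 was_high = False
--     if was_high:
--         d_segments.append((start, i_hi))
--
--     return d_segments
-- ===== SOURCE B (Python) =====
-- def py_segments_from_diagonal(seq1, seq2, window, threshold, min_gap_length,
--         diagonal):
--     i_lo = max(0, -diagonal)
--     i_hi = min(len(seq1), len(seq2) - diagonal)
--     n = max(0, i_hi - i_lo)
--     # prefix[t] = number of matching positions among the first t diagonal cells
--     prefix = [0]
--     for t in range(n):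
--         prefix.append(prefix[t] + (seq1[i_lo + t] == seq2[i_lo + t + diagonal]))
--     d_segments = []
--     was_high = False
--     start = 0
--     for t in range(n):
--         i = i_lo + t
--         score = prefix[t + 1] - prefix[max(0, t + 1 - window)]
--         if score >= threshold:
--             if not was_high:
--                 start = max(i_lo, i - window)
--                 if d_segments and start - d_segments[-1][1] < min_gap_length:
--                     start = d_segments.pop()[0]
--                 was_high = True
--         elif was_high:
--             d_segments.append((start, i))
--             was_high = False
--     if was_high:
--         d_segments.append((start, i_hi))
--     return d_segments
-- ===== Notes on version B (the rewrite author's own statement) =====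
-- stated objective: alternative
-- what changed: Replaces the mutable ring buffer 'scores' with incremental score updates by a precomputed prefix-sum array over the diagonal, so each window score is obtained as a difference of two prefix sums instead of being maintained via modular indexing into a circular buffer.
import Mathlib
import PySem

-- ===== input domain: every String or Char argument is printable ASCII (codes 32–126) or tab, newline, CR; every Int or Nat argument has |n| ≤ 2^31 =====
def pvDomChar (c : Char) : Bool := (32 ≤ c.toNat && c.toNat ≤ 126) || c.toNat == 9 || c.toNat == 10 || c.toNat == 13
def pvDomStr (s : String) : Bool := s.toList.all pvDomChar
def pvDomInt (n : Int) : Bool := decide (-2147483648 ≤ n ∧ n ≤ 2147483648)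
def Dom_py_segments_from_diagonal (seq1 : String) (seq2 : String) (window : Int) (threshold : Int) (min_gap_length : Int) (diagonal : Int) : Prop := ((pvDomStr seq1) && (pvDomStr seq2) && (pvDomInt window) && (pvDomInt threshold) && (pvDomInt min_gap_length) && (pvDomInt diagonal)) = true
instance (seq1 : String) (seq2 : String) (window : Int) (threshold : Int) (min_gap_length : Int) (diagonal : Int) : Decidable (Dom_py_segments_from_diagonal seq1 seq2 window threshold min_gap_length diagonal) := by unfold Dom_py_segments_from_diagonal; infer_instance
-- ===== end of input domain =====

-- B replaces A's mutable ring buffer and incremental score bookkeeping with a prefix-sum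
-- array over the diagonal (window score = difference of two prefix sums); same cost class.


-- ===== PORT A =====
def py_segments_from_diagonal (seq1 : String) (seq2 : String) (window : Int) (threshold : Int) (min_gap_length : Int) (diagonal : Int) : List (Int × Int) :=
  let s1 := seq1.toList
  let s2 := seq2.toList
  let i_lo : Int := max 0 (-diagonal)
  let i_hi : Int := min (s1.length : Int) ((s2.length : Int) - diagonal)
  -- state: (d_segments, was_high, start, scores, score); start initialised to 0 (never read before first assignment)
  let st := (PySem.List.pyRange i_lo i_hi 1).foldl (fun st i =>
      let segs := st.1
      let was_high := st.2.1
      let start := st.2.2.1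
      let scores := st.2.2.2.1
      let score := st.2.2.2.2
      let j := i + diagonal
      let k := (PySem.Int.mod i window).toNat   -- k = i % window; Pre_ excludes window ≤ 0 with a nonempty range (Python raises there)
      let score := score - scores.getD k 0      -- scores[k]; k in range under Pre_
      let v : Int := if PySem.List.pyGet? s1 i = PySem.List.pyGet? s2 j then 1 else 0  -- seq1[i] == seq2[j]; both indices in range for i in [i_lo, i_hi)
      let scores := scores.set k v
      let score := score + scores.getD k 0
      if threshold ≤ score then
        if was_high then (segs, true, start, scores, score)
        else
          let start := max i_lo (i - window)
          match segs.getLast? with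
          | some last =>
              if start - last.2 < min_gap_length then (segs.dropLast, true, last.1, scores, score)
              else (segs, true, start, scores, score)
          | none => (segs, true, start, scores, score)
      else
        if was_high then (segs ++ [(start, i)], false, start, scores, score)
        else (segs, false, start, scores, score))
    (([] : List (Int × Int)), false, (0 : Int), List.replicate window.toNat (0 : Int), (0 : Int))
  if st.2.1 then st.1 ++ [(st.2.2.1, i_hi)] else st.1

-- ===== PORT B =====
def py_segments_from_diagonal_alt (seq1 : String) (seq2 : String) (window : Int) (threshold : Int) (min_gap_length : Int) (diagonal : Int) : List (Int × Int) :=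
  let s1 := seq1.toList
  let s2 := seq2.toList
  let i_lo : Int := max 0 (-diagonal)
  let i_hi : Int := min (s1.length : Int) ((s2.length : Int) - diagonal)
  let n : Int := max 0 (i_hi - i_lo)
  let pre := (PySem.List.pyRange 0 n 1).foldl (fun pr t =>
      pr ++ [pr.getD t.toNat 0 + (if PySem.List.pyGet? s1 (i_lo + t) = PySem.List.pyGet? s2 (i_lo + t + diagonal) then 1 else 0)])
    [(0 : Int)]
  -- state: (d_segments, was_high, start)
  let st := (PySem.List.pyRange 0 n 1).foldl (fun st t =>
      let segs := st.1
      let was_high := st.2.1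
      let start := st.2.2
      let i := i_lo + t
      let score := pre.getD (t + 1).toNat 0 - pre.getD (max 0 (t + 1 - window)).toNat 0  -- prefix[t+1] - prefix[max(0, t+1-window)]; in range under Pre_
      if threshold ≤ score then
        if was_high then st
        else
          let start := max i_lo (i - window)
          match segs.getLast? with
          | some last =>
              if start - last.2 < min_gap_length then (segs.dropLast, true, last.1)
              else (segs, true, start)
          | none => (segs, true, start)
      else
        if was_high then (segs ++ [(start, i)], false, start)
        else st)
    (([] : List (Int × Int)), false, (0 : Int))
  if st.2.1 then st.1 ++ [(st.2.2, i_hi)] else st.1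

-- ===== PRECONDITION & SPEC =====
-- Pre_ excludes exactly the inputs where A raises: window ≤ 0 together with a nonempty
-- diagonal range gives ZeroDivisionError (window = 0) or IndexError (window < 0) in A.
def Pre_py_segments_from_diagonal (seq1 : String) (seq2 : String) (window : Int) (threshold : Int) (min_gap_length : Int) (diagonal : Int) : Prop :=
  1 ≤ window ∨ min (seq1.toList.length : Int) ((seq2.toList.length : Int) - diagonal) ≤ max 0 (-diagonal)
instance (seq1 : String) (seq2 : String) (window : Int) (threshold : Int) (min_gap_length : Int) (diagonal : Int) : Decidable (Pre_py_segments_from_diagonal seq1 seq2 window threshold min_gap_length diagonal) := by unfold Pre_py_segments_from_diagonal; infer_instance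

def pvWitness_py_segments_from_diagonal : String × String × Int × Int × Int × Int := ("ab", "ab", 2, 2, 1, 0)

def Spec_py_segments_from_diagonal (seq1 : String) (seq2 : String) (window : Int) (threshold : Int) (min_gap_length : Int) (diagonal : Int) (out : List (Int × Int)) : Prop := out = py_segments_from_diagonal_alt seq1 seq2 window threshold min_gap_length diagonal
instance (seq1 : String) (seq2 : String) (window : Int) (threshold : Int) (min_gap_length : Int) (diagonal : Int) (out : List (Int × Int)) : Decidable (Spec_py_segments_from_diagonal seq1 seq2 window threshold min_gap_length diagonal out) := by unfold Spec_py_segments_from_diagonal; infer_instance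

-- ===== CLAIM (what is proved, stated in full; the proofs are below) =====
def Claim_equal_py_segments_from_diagonal : Prop := ∀ (seq1 : String) (seq2 : String) (window : Int) (threshold : Int) (min_gap_length : Int) (diagonal : Int), Dom_py_segments_from_diagonal seq1 seq2 window threshold min_gap_length diagonal → Pre_py_segments_from_diagonal seq1 seq2 window threshold min_gap_length diagonal → Spec_py_segments_from_diagonal seq1 seq2 window threshold min_gap_length diagonal (py_segments_from_diagonal seq1 seq2 window threshold min_gap_length diagonal)

-- ===== LEMMAS AND PROOFS =====

def pvP (m : Nat → Int) : Nat → Int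
  | 0 => 0
  | t + 1 => pvP m t + m t

def pvAstep (lo w thr gap : Int) (m : Nat → Int)
    (st : List (Int × Int) × Bool × Int × List Int × Int) (t : Nat) :
    List (Int × Int) × Bool × Int × List Int × Int :=
  let segs := st.1
  let was_high := st.2.1
  let start := st.2.2.1
  let scores := st.2.2.2.1
  let score := st.2.2.2.2
  let i : Int := lo + t
  let k := (PySem.Int.mod i w).toNat
  let score := score - scores.getD k 0
  let scores := scores.set k (m t)
  let score := score + scores.getD k 0
  if thr ≤ score then
    if was_high then (segs, true, start, scores, score)
    else
      let start := max lo (i - w)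
      match segs.getLast? with
      | some last =>
          if start - last.2 < gap then (segs.dropLast, true, last.1, scores, score)
          else (segs, true, start, scores, score)
      | none => (segs, true, start, scores, score)
  else
    if was_high then (segs ++ [(start, i)], false, start, scores, score)
    else (segs, false, start, scores, score)

def pvBstep (lo w thr gap : Int) (sc : Nat → Int)
    (st : List (Int × Int) × Bool × Int) (t : Nat) :
    List (Int × Int) × Bool × Int :=
  let segs := st.1
  let was_high := st.2.1
  let start := st.2.2
  let i : Int := lo + t
  let score := sc t
  if thr ≤ score then
    if was_high then st
    else
      let start := max lo (i - w)
      match segs.getLast? with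
      | some last =>
          if start - last.2 < gap then (segs.dropLast, true, last.1)
          else (segs, true, start)
      | none => (segs, true, start)
  else
    if was_high then (segs ++ [(start, i)], false, start)
    else st

lemma pv_mod_add_self (a w : Int) (hw : 0 < w) : PySem.Int.mod (a + w) w = PySem.Int.mod a w := by
  rw [PySem.Int.mod_eq_emod_of_pos hw, PySem.Int.mod_eq_emod_of_pos hw, Int.add_emod_right]

lemma pv_main_inv (lo w thr gap : Int) (hw : 1 ≤ w) (m sc : Nat → Int) (N : Nat) :
    (∀ k, k < N → sc k = pvP m (k + 1) - pvP m (k + 1 - w.toNat)) →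
    ∀ a b, a = (List.range N).foldl (pvAstep lo w thr gap m)
      (([] : List (Int × Int)), false, (0 : Int), List.replicate w.toNat (0 : Int), (0 : Int)) →
    b = (List.range N).foldl (pvBstep lo w thr gap sc)
      (([] : List (Int × Int)), false, (0 : Int)) →
    a.1 = b.1 ∧ a.2.1 = b.2.1 ∧ a.2.2.1 = b.2.2 ∧ a.2.2.2.1.length = w.toNat ∧
    (∀ u : Nat, N ≤ u → u < N + w.toNat →
      (a.2.2.2.1).getD ((PySem.Int.mod (lo + (u : Int)) w).toNat) 0 =
        (if w.toNat ≤ u then m (u - w.toNat) else 0)) ∧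
    a.2.2.2.2 = pvP m N - pvP m (N - w.toNat) := by
  have hw0 : (0 : Int) < w := by omega
  have hwN : 1 ≤ w.toNat := by omega
  induction N with
  | zero =>
      intro _ a b ha hb; subst ha hb
      refine ⟨rfl, rfl, rfl, List.length_replicate, ?_, by simp [pvP]⟩
      intro u h1 h2
      rw [if_neg (by omega)]
      simp [List.getD]
  | succ N ih =>
      intro hsc a b ha hb
      obtain ⟨e1, e2, e3, hlen, hslot, hscore⟩ := ih (fun k hk => hsc k (by omega)) _ _ rfl rfl
      set A := (List.range N).foldl (pvAstep lo w thr gap m)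
        (([] : List (Int × Int)), false, (0 : Int), List.replicate w.toNat (0 : Int), (0 : Int)) with hA
      set B := (List.range N).foldl (pvBstep lo w thr gap sc)
        (([] : List (Int × Int)), false, (0 : Int)) with hB
      rw [List.range_succ, List.foldl_append, List.foldl_cons, List.foldl_nil] at ha hb
      rw [← hA] at ha; rw [← hB] at hb
      -- facts about the written slot
      have hkw : (PySem.Int.mod (lo + (N : Int)) w).toNat < w.toNat := by
        have h1 := PySem.Int.mod_lt (lo + (N : Int)) hw0
        have h2 := PySem.Int.mod_nonneg (lo + (N : Int)) hw0
        omega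
      set k := (PySem.Int.mod (lo + (N : Int)) w).toNat with hk
      have hold : A.2.2.2.1.getD k 0 = (if w.toNat ≤ N then m (N - w.toNat) else 0) :=
        hslot N le_rfl (by omega)
      have hgetset : (A.2.2.2.1.set k (m N)).getD k 0 = m N := by
        simp [List.getD, List.getElem?_set_self, hlen ▸ hkw]
      -- new score value
      have hnewscore : A.2.2.2.2 - A.2.2.2.1.getD k 0 + (A.2.2.2.1.set k (m N)).getD k 0
          = pvP m (N + 1) - pvP m (N + 1 - w.toNat) := by
        rw [hold, hgetset, hscore]
        by_cases hWN : w.toNat ≤ N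
        · rw [if_pos hWN]
          have h1 : N + 1 - w.toNat = (N - w.toNat) + 1 := by omega
          have h2 : N - w.toNat + 1 + w.toNat = N + 1 := by omega
          rw [h1]
          simp [pvP]
          ring
        · rw [if_neg hWN]
          have h1 : N - w.toNat = 0 := by omega
          have h2 : N + 1 - w.toNat = 0 := by omega
          rw [h1, h2]
          simp [pvP]
      -- new slot invariant
      have hslot' : ∀ u : Nat, N + 1 ≤ u → u < N + 1 + w.toNat →
          (A.2.2.2.1.set k (m N)).getD ((PySem.Int.mod (lo + (u : Int)) w).toNat) 0 =
            (if w.toNat ≤ u then m (u - w.toNat) else 0) := by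
        intro u h1 h2
        by_cases hu : u = N + w.toNat
        · subst hu
          have hcast : lo + ((N + w.toNat : Nat) : Int) = (lo + (N : Int)) + w := by
            push_cast; omega
          rw [hcast, pv_mod_add_self _ _ hw0, ← hk, hgetset, if_pos (by omega)]
          congr 1
          omega
        · have hne : (PySem.Int.mod (lo + (u : Int)) w).toNat ≠ k := by
            intro hEq
            have hmu1 := PySem.Int.mod_lt (lo + (u : Int)) hw0
            have hmu2 := PySem.Int.mod_nonneg (lo + (u : Int)) hw0
            have hmn1 := PySem.Int.mod_lt (lo + (N : Int)) hw0
            have hmn2 := PySem.Int.mod_nonneg (lo + (N : Int)) hw0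
            have hEq' : PySem.Int.mod (lo + (u : Int)) w = PySem.Int.mod (lo + (N : Int)) w := by
              rw [hk] at hEq; omega
            rw [PySem.Int.mod_eq_emod_of_pos hw0, PySem.Int.mod_eq_emod_of_pos hw0] at hEq'
            have hdvd : w ∣ ((lo + (u : Int)) - (lo + (N : Int))) :=
              Int.dvd_of_emod_eq_zero (by rw [Int.sub_emod, hEq', sub_self, Int.zero_emod])
            have hsum : (lo + (u : Int)) - (lo + (N : Int)) = ((u - N : Nat) : Int) := by
              push_cast; omega
            rw [hsum] at hdvd
            have hpos : (0 : Int) < ((u - N : Nat) : Int) := by omega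
            have := Int.le_of_dvd hpos hdvd
            omega
          rw [List.getD, List.getElem?_set_ne hne.symm, ← List.getD]
          exact hslot u (by omega) (by omega)
      subst ha hb
      -- case split on the step
      simp only [pvAstep, pvBstep]
      rw [← hk, hnewscore, hsc N (by omega), e1, e2, e3]
      have hlen' : (A.2.2.2.1.set k (m N)).length = w.toNat := by simp [hlen]
      by_cases hthr : thr ≤ pvP m (N + 1) - pvP m (N + 1 - w.toNat)
      · rw [if_pos hthr, if_pos hthr]
        cases hb2 : B.2.1
        · simp only [hb2, Bool.false_eq_true, if_false]
          cases hL : B.1.getLast? with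
          | none =>
              simp only [hL]
              and_intros <;> first | rfl | trivial | exact hlen' | exact hslot' | exact e1 | exact e2 | exact e3
          | some last =>
              simp only [hL]
              by_cases hg : max lo (lo + (N : Int) - w) - last.2 < gap
              · rw [if_pos hg, if_pos hg]
                and_intros <;> first | rfl | trivial | exact hlen' | exact hslot' | exact e1 | exact e2 | exact e3
              · rw [if_neg hg, if_neg hg]
                and_intros <;> first | rfl | trivial | exact hlen' | exact hslot' | exact e1 | exact e2 | exact e3
        · simp only [hb2, if_true]
          and_intros <;> first | rfl | trivial | exact hlen' | exact hslot' | exact e1 | exact e2 | exact e3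
      · rw [if_neg hthr, if_neg hthr]
        cases hb2 : B.2.1
        · simp only [hb2, Bool.false_eq_true, if_false]
          and_intros <;> first | rfl | trivial | exact hlen' | exact hslot' | exact e1 | exact e2 | exact e3
        · simp only [hb2, if_true]
          and_intros <;> first | rfl | trivial | exact hlen' | exact hslot' | exact e1 | exact e2 | exact e3


def pvM (s1 s2 : List Char) (lo d : Int) (t : Nat) : Int :=
  if PySem.List.pyGet? s1 (lo + t) = PySem.List.pyGet? s2 (lo + t + d) then 1 else 0

def pvPrefix (s1 s2 : List Char) (lo d : Int) (N : Nat) : List Int :=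
  (List.range N).foldl (fun pr k => pr ++ [pr.getD k 0 + pvM s1 s2 lo d k]) [0]

def pvSc (pre : List Int) (w : Int) (k : Nat) : Int :=
  pre.getD ((k : Int) + 1).toNat 0 - pre.getD (max 0 ((k : Int) + 1 - w)).toNat 0

def pvArun (s1 s2 : List Char) (w thr gap d : Int) : List (Int × Int) :=
  let lo : Int := max 0 (-d)
  let hi : Int := min (s1.length : Int) ((s2.length : Int) - d)
  let a := (List.range (hi - lo).toNat).foldl (pvAstep lo w thr gap (pvM s1 s2 lo d))
    (([] : List (Int × Int)), false, (0 : Int), List.replicate w.toNat (0 : Int), (0 : Int))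
  if a.2.1 then a.1 ++ [(a.2.2.1, hi)] else a.1

def pvBrun (s1 s2 : List Char) (w thr gap d : Int) : List (Int × Int) :=
  let lo : Int := max 0 (-d)
  let hi : Int := min (s1.length : Int) ((s2.length : Int) - d)
  let N := (max 0 (hi - lo)).toNat
  let b := (List.range N).foldl (pvBstep lo w thr gap (pvSc (pvPrefix s1 s2 lo d N) w))
    (([] : List (Int × Int)), false, (0 : Int))
  if b.2.1 then b.1 ++ [(b.2.2, hi)] else b.1

lemma pv_prefix_fold (m : Nat → Int) (N : Nat) :
    (List.range N).foldl (fun pr k => pr ++ [pr.getD k 0 + m k]) [(0 : Int)] =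
      (List.range (N + 1)).map (pvP m) := by
  induction N with
  | zero => simp [pvP]
  | succ N ih =>
      rw [List.range_succ, List.foldl_append, ih, List.foldl_cons, List.foldl_nil]
      have hget : ((List.range (N + 1)).map (pvP m)).getD N 0 = pvP m N := by
        simp [List.getD, List.getElem?_map, List.getElem?_range (by omega : N < N + 1)]
      rw [hget, List.range_succ (n := N + 1), List.map_append]
      rfl

lemma pv_portA_eq (seq1 seq2 : String) (w thr gap d : Int) :
    py_segments_from_diagonal seq1 seq2 w thr gap d = pvArun seq1.toList seq2.toList w thr gap d := by
  simp only [py_segments_from_diagonal, pvArun, PySem.List.pyRange_one, List.foldl_map]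
  rfl

lemma pv_portB_eq (seq1 seq2 : String) (w thr gap d : Int) :
    py_segments_from_diagonal_alt seq1 seq2 w thr gap d = pvBrun seq1.toList seq2.toList w thr gap d := by
  simp only [py_segments_from_diagonal_alt, pvBrun, PySem.List.pyRange_zero, List.foldl_map]
  rfl

lemma pv_run_eq (s1 s2 : List Char) (w thr gap d : Int) (hw : 1 ≤ w) :
    pvArun s1 s2 w thr gap d = pvBrun s1 s2 w thr gap d := by
  simp only [pvArun, pvBrun]
  set lo : Int := max 0 (-d) with hlo
  set hi : Int := min (s1.length : Int) ((s2.length : Int) - d) with hhi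
  have hN : (max 0 (hi - lo)).toNat = (hi - lo).toNat := by omega
  rw [hN]
  set N := (hi - lo).toNat with hNdef
  set m := pvM s1 s2 lo d with hm
  have epre : pvPrefix s1 s2 lo d N = (List.range (N + 1)).map (pvP m) := pv_prefix_fold m N
  have hsc : ∀ k, k < N → pvSc (pvPrefix s1 s2 lo d N) w k
      = pvP m (k + 1) - pvP m (k + 1 - w.toNat) := by
    intro k hk
    unfold pvSc
    rw [epre]
    have h1 : ((k : Int) + 1).toNat = k + 1 := by omega
    have h2 : (max 0 ((k : Int) + 1 - w)).toNat = k + 1 - w.toNat := by omega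
    rw [h1, h2]
    have g1 : ((List.range (N + 1)).map (pvP m)).getD (k + 1) 0 = pvP m (k + 1) := by
      simp [List.getD, List.getElem?_map, List.getElem?_range (show k + 1 < N + 1 by omega)]
    have g2 : ((List.range (N + 1)).map (pvP m)).getD (k + 1 - w.toNat) 0 = pvP m (k + 1 - w.toNat) := by
      simp [List.getD, List.getElem?_map, List.getElem?_range (show k + 1 - w.toNat < N + 1 by omega)]
    rw [g1, g2]
  obtain ⟨e1, e2, e3, -, -, -⟩ := pv_main_inv lo w thr gap hw m _ N hsc _ _ rfl rfl
  rw [e1, e2, e3]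

lemma pv_run_empty (s1 s2 : List Char) (w thr gap d : Int)
    (h : min (s1.length : Int) ((s2.length : Int) - d) ≤ max 0 (-d)) :
    pvArun s1 s2 w thr gap d = pvBrun s1 s2 w thr gap d := by
  simp only [pvArun, pvBrun]
  have h1 : (min (s1.length : Int) ((s2.length : Int) - d) - max 0 (-d)).toNat = 0 := by omega
  have h2 : (max 0 (min (s1.length : Int) ((s2.length : Int) - d) - max 0 (-d))).toNat = 0 := by omega
  rw [h1, h2]
  simp


-- ===== VERDICT (by name: the statement is the Claim_ definition above) =====
theorem py_segments_from_diagonal_spec : Claim_equal_py_segments_from_diagonal := by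
  intro seq1 seq2 window threshold min_gap_length diagonal _ hpre
  unfold Spec_py_segments_from_diagonal
  rw [pv_portA_eq, pv_portB_eq]
  unfold Pre_py_segments_from_diagonal at hpre
  rcases hpre with hw | hle
  · exact pv_run_eq _ _ _ _ _ _ hw
  · exact pv_run_empty _ _ _ _ _ _ hle
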